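-- pv_equiv track=rewrite | github.com/cbulacan9/gads | src/gads/cli.py | _extract_script_name
-- ===== SOURCE A (Python) =====
-- def _extract_script_name(content: str, index: int) -> str:
--     """Try to extract a meaningful script name from GDScript content."""
--     lines = content.strip().split("\n")
--
--     # Look for class_name
--     for line in lines[:10]:
--         if line.startswith("class_name "):
--             name = line.replace("class_name ", "").strip()
--             return name.lower()
--
--     # Look for extends to guess name
--     for line in lines[:5]:
--         if line.startswith("extends "):
--             base = line.replace("extends ", "").strip()
--             if "CharacterBody" in base:
--                 return "player"
--             elif "Area" in base:
--                 return "trigger"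
--             elif "RigidBody" in base:
--                 return "physics_object"
--
--     # Fallback
--     return f"script_{index}"
-- ===== SOURCE B (Python) =====
-- _BASE_TABLE = [("CharacterBody", "player"), ("Area", "trigger"), ("RigidBody", "physics_object")]
--
--
-- def _extract_script_name(content: str, index: int) -> str:
--     """Single pass over the first 10 lines with a fallback variable (same result as the two-loop version)."""
--     fallback = None
--     for i, line in enumerate(content.strip().split("\n")[:10]):
--         if line.startswith("class_name "):
--             return line.replace("class_name ", "").strip().lower()
--         if i < 5 and fallback is None and line.startswith("extends "):
--             base = line.replace("extends ", "").strip()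
--             for sub, name in _BASE_TABLE:
--                 if sub in base:
--                     fallback = name
--                     break
--     return fallback if fallback is not None else f"script_{index}"
-- ===== Notes on version B (the rewrite author's own statement) =====
-- stated objective: simpler
-- what changed: A's two sequential scans (class_name over lines[:10], then an extends if/elif chain over lines[:5]) are merged into one enumerate pass with a fallback variable, and the hard-coded if/elif chain becomes a first-match lookup in an ordered (substring, name) table.
import Mathlib
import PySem

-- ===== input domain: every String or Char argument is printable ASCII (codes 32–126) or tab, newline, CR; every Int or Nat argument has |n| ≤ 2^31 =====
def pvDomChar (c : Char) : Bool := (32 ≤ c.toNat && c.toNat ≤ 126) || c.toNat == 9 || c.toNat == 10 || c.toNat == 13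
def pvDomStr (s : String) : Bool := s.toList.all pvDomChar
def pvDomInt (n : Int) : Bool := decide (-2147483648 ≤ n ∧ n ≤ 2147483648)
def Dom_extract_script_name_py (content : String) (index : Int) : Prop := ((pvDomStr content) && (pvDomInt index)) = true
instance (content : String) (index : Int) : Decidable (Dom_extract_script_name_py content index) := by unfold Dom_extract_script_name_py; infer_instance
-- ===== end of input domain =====

-- B replaces A's two sequential scans (class_name over lines[:10], then the extends if/elif chain over lines[:5])
-- by a single pass with a fallback variable and a data-driven (substring, name) table; objective: simpler, same result.

-- ===== PORT A =====
-- content.strip().split("\n"); the separator is the literal "\n" ≠ "", so split? is always some and getD [] is exact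
def pvLines (content : String) : List String :=
  (PySem.Str.split? (PySem.Str.strip content) "\n").getD []

-- first loop of A: scan for a 'class_name ' line (some = early return value)
def pvA_classLoop : List String → Option String
  | [] => none
  | line :: rest =>
    if PySem.Str.startswith line "class_name " then
      some (PySem.Str.lower (PySem.Str.strip (PySem.Str.replace line "class_name " "")))
    else pvA_classLoop rest

-- second loop of A: scan for an 'extends ' line whose base matches the if/elif chain
def pvA_extLoop : List String → Option String
  | [] => none
  | line :: rest =>
    if PySem.Str.startswith line "extends " then
      let base := PySem.Str.strip (PySem.Str.replace line "extends " "")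
      if PySem.Str.isIn "CharacterBody" base then some "player"
      else if PySem.Str.isIn "Area" base then some "trigger"
      else if PySem.Str.isIn "RigidBody" base then some "physics_object"
      else pvA_extLoop rest
    else pvA_extLoop rest

def extract_script_name_py (content : String) (index : Int) : String :=
  match pvA_classLoop (PySem.List.slice (pvLines content) none (some 10)) with
  | some n => n
  | none =>
    match pvA_extLoop (PySem.List.slice (pvLines content) none (some 5)) with
    | some n => n
    | none => "script_" ++ PySem.Int.toStr index

-- ===== PORT B =====
def pvB_table : List (String × String) :=
  [("CharacterBody", "player"), ("Area", "trigger"), ("RigidBody", "physics_object")]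

-- first (sub, name) of the table with sub in base, if any
def pvB_lookup (base : String) : List (String × String) → Option String
  | [] => none
  | (sub, name) :: rest =>
    if PySem.Str.isIn sub base then some name else pvB_lookup base rest

-- the single 'for i, line in enumerate(...)' loop of Source B, counter i and fallback carried through
def pvB_loop (index : Int) : Nat → Option String → List String → String
  | _, fb, [] =>
    match fb with
    | some f => f
    | none => "script_" ++ PySem.Int.toStr index
  | i, fb, line :: rest =>
    if PySem.Str.startswith line "class_name " then
      PySem.Str.lower (PySem.Str.strip (PySem.Str.replace line "class_name " ""))
    else
      let fb' :=
        if i < 5 ∧ fb = none ∧ PySem.Str.startswith line "extends " = true then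
          pvB_lookup (PySem.Str.strip (PySem.Str.replace line "extends " "")) pvB_table
        else fb
      pvB_loop index (i + 1) fb' rest

def extract_script_name_py_alt (content : String) (index : Int) : String :=
  pvB_loop index 0 none
    (PySem.List.slice (pvLines content) none (some 10))

-- ===== PRECONDITION & SPEC =====
def Spec_extract_script_name_py (content : String) (index : Int) (out : String) : Prop := out = extract_script_name_py_alt content index
instance (content : String) (index : Int) (out : String) : Decidable (Spec_extract_script_name_py content index out) := by unfold Spec_extract_script_name_py; infer_instance

-- ===== CLAIM (what is proved, stated in full; the proofs are below) =====
def Claim_equal_extract_script_name_py : Prop := ∀ (content : String) (index : Int), Dom_extract_script_name_py content index → Spec_extract_script_name_py content index (extract_script_name_py content index)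

-- ===== LEMMAS AND PROOFS =====

-- B's table lookup computes exactly A's if/elif chain (as an Option)
lemma pvB_lookup_table (base : String) :
    pvB_lookup base pvB_table =
      if PySem.Str.isIn "CharacterBody" base then some "player"
      else if PySem.Str.isIn "Area" base then some "trigger"
      else if PySem.Str.isIn "RigidBody" base then some "physics_object"
      else none := rfl

-- invariant of B's single pass: a class_name hit wins; else the fallback; else A's extends scan on what is left of the first 5 lines
lemma pvB_loop_eq (index : Int) (l : List String) :
    ∀ (i : Nat) (fb : Option String),
      pvB_loop index i fb l =
        match pvA_classLoop l with
        | some n => n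
        | none =>
          match fb with
          | some f => f
          | none =>
            match pvA_extLoop (l.take (5 - i)) with
            | some n => n
            | none => "script_" ++ PySem.Int.toStr index := by
  induction l with
  | nil => intro i fb; rw [List.take_nil]; cases fb <;> rfl
  | cons line rest ih =>
    intro i fb
    rw [pvB_loop, pvA_classLoop]
    by_cases hc : PySem.Str.startswith line "class_name " = true
    · simp only [if_pos hc]
    · simp only [if_neg hc]
      rw [ih]
      cases hcr : pvA_classLoop rest with
      | some n => rfl
      | none =>
        cases fb with
        | some f =>
          rw [if_neg (by simp : ¬ (i < 5 ∧ (some f : Option String) = none ∧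
            PySem.Str.startswith line "extends " = true))]
        | none =>
          by_cases hi : i < 5
          · have htake : List.take (5 - i) (line :: rest) =
                line :: List.take (5 - (i + 1)) rest := by
              have h51 : 5 - i = (5 - (i + 1)) + 1 := by omega
              rw [h51, List.take_succ_cons]
            rw [htake]
            by_cases he : PySem.Str.startswith line "extends " = true
            · rw [if_pos ⟨hi, rfl, he⟩, pvB_lookup_table, pvA_extLoop]
              simp only [if_pos he]
              split_ifs <;> rfl
            · rw [if_neg (fun h => he h.2.2), pvA_extLoop]
              simp only [if_neg he]
          · rw [if_neg (fun h => hi h.1)]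
            have h1 : 5 - i = 0 := by omega
            have h2 : 5 - (i + 1) = 0 := by omega
            rw [h1, h2, List.take_zero, List.take_zero]

-- ===== VERDICT (by name: the statement is the Claim_ definition above) =====
theorem extract_script_name_py_spec : Claim_equal_extract_script_name_py := by
  intro content index _
  unfold Spec_extract_script_name_py extract_script_name_py extract_script_name_py_alt
  have h10 : PySem.List.slice (pvLines content) none (some 10) = (pvLines content).take 10 := by
    rw [PySem.List.slice_to (pvLines content) (by decide : (0:Int) ≤ 10),
      (show Int.toNat 10 = 10 from rfl)]
  have h5 : PySem.List.slice (pvLines content) none (some 5) = (pvLines content).take 5 := by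
    rw [PySem.List.slice_to (pvLines content) (by decide : (0:Int) ≤ 5),
      (show Int.toNat 5 = 5 from rfl)]
  rw [h10, h5, pvB_loop_eq, Nat.sub_zero, List.take_take,
    (show (min 5 10 : Nat) = 5 from rfl)]
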